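-- pv_equiv track=rewrite | github.com/RositaguiUP/Compilers | Compiler/lexeme_classifier.py | split_with_delimiters
-- ===== SOURCE A (Python) =====
-- def split_with_delimiters(text, delimiters):
--     parts = []
--     current_part = ""
--     for char in text:
--         if char in delimiters:
--             if current_part:
--                 parts.append(current_part)
--             parts.append(char)
--             current_part = ""
--         else:
--             current_part += char
--     if current_part:
--         parts.append(current_part)
--     return parts
-- ===== SOURCE B (Python) =====
-- def split_with_delimiters(text, delimiters):
--     # Build the token list back-to-front: walk the text in reverse and either
--     # push a delimiter token or extend the first following word token.
--     parts = []
--     for c in reversed(text):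
--         if c in delimiters:
--             parts.insert(0, c)
--         elif parts and parts[0][0] not in delimiters:
--             parts[0] = c + parts[0]
--         else:
--             parts.insert(0, c)
--     return parts
-- ===== Notes on version B (the rewrite author's own statement) =====
-- stated objective: alternative
-- what changed: B replaces A's forward accumulate-and-flush loop (growing a current_part buffer and flushing it at each delimiter) with a single reverse walk that builds the token list back-to-front, either prepending a delimiter token or extending the first following word token.
import Mathlib
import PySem

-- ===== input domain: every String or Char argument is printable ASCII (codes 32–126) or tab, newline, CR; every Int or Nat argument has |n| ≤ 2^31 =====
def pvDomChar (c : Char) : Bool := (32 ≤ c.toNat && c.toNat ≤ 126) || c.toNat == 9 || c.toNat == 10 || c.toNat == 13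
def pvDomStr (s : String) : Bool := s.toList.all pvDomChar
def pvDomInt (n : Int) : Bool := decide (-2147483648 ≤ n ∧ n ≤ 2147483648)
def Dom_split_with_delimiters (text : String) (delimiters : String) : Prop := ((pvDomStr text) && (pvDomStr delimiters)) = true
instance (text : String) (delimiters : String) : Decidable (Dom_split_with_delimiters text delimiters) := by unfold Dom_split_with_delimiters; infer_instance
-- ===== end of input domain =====

-- B builds the token list back-to-front (reverse walk, extending the first word token);
-- same cost as A's forward accumulate/flush loop — objective: alternative.

-- ===== PORT A =====
-- A's flush `if current_part: parts.append(current_part)` (run on a delimiter hit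
-- and once more after the loop).
def pvFlushA (parts : List String) (cur : List Char) : List String :=
  if cur = [] then parts else parts ++ [String.ofList cur]

-- A's for-loop over the characters of text, state = (parts, current_part).
def pvLoopA (D : List Char) : List Char → List String → List Char → List String
  | [], parts, cur => pvFlushA parts cur
  | c :: cs, parts, cur =>
      if c ∈ D then pvLoopA D cs (pvFlushA parts cur ++ [String.ofList [c]]) []
      else pvLoopA D cs parts (cur ++ [c])

def split_with_delimiters (text : String) (delimiters : String) : List String :=
  pvLoopA delimiters.toList text.toList [] []

-- ===== PORT B =====
-- One step of B's reversed loop body (c = current char, parts = tokens built so far).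
-- The `s.toList = []` arm is the unreachable case where Python's parts[0][0] would
-- raise (tokens are never empty strings); ported as the plain insert branch.
def pvStepB (D : List Char) (c : Char) (parts : List String) : List String :=
  if c ∈ D then String.ofList [c] :: parts
  else
    match parts with
    | [] => [String.ofList [c]]
    | s :: tail =>
      match s.toList with
      | [] => String.ofList [c] :: s :: tail
      | d :: ds => if d ∈ D then String.ofList [c] :: s :: tail
                   else String.ofList (c :: d :: ds) :: tail

def split_with_delimiters_alt (text : String) (delimiters : String) : List String :=
  text.toList.foldr (pvStepB delimiters.toList) []

-- ===== PRECONDITION & SPEC =====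
def Spec_split_with_delimiters (text : String) (delimiters : String) (out : List String) : Prop := out = split_with_delimiters_alt text delimiters
instance (text : String) (delimiters : String) (out : List String) : Decidable (Spec_split_with_delimiters text delimiters out) := by unfold Spec_split_with_delimiters; infer_instance

-- ===== CLAIM (what is proved, stated in full; the proofs are below) =====
def Claim_equal_split_with_delimiters : Prop := ∀ (text : String) (delimiters : String), Dom_split_with_delimiters text delimiters → Spec_split_with_delimiters text delimiters (split_with_delimiters text delimiters)

-- ===== LEMMAS AND PROOFS =====

-- "prepend the pending accumulator cur to B's token list r": the bridge between
-- A's (parts, cur) state and B's back-to-front result.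
def pvMerge (D : List Char) (cur : List Char) (r : List String) : List String :=
  if cur = [] then r
  else
    match r with
    | [] => [String.ofList cur]
    | s :: tail =>
      match s.toList with
      | [] => String.ofList cur :: s :: tail
      | d :: ds => if d ∈ D then String.ofList cur :: s :: tail
                   else String.ofList (cur ++ d :: ds) :: tail

lemma pvMerge_nil (D : List Char) (r : List String) : pvMerge D [] r = r := by
  simp [pvMerge]

lemma pvMerge_snoc {D : List Char} {c : Char} (hc : c ∉ D) (cur : List Char) (r : List String) :
    pvMerge D (cur ++ [c]) r = pvMerge D cur (pvStepB D c r) := by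
  by_cases hcur : cur = []
  · subst hcur
    rw [pvMerge_nil]
    cases r with
    | nil => simp [pvStepB, pvMerge, hc]
    | cons s tail =>
      cases hs : s.toList with
      | nil => simp [pvStepB, pvMerge, hc, hs]
      | cons d ds => by_cases hd : d ∈ D <;> simp [pvStepB, pvMerge, hc, hs, hd]
  · have hne : cur ++ [c] ≠ [] := by simp
    cases r with
    | nil => simp [pvStepB, pvMerge, hc, hcur, hne]
    | cons s tail =>
      cases hs : s.toList with
      | nil => simp [pvStepB, pvMerge, hc, hcur, hne, hs]
      | cons d ds =>
        by_cases hd : d ∈ D <;>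
          simp [pvStepB, pvMerge, hc, hcur, hne, hs, hd, List.append_assoc]

lemma pvLoopA_eq (D : List Char) (chars : List Char) :
    ∀ (parts : List String) (cur : List Char),
      pvLoopA D chars parts cur = parts ++ pvMerge D cur (chars.foldr (pvStepB D) []) := by
  induction chars with
  | nil =>
    intro parts cur
    by_cases hcur : cur = [] <;>
      simp [pvLoopA, pvFlushA, pvMerge, hcur]
  | cons c cs ih =>
    intro parts cur
    rw [List.foldr_cons, pvLoopA]
    by_cases hc : c ∈ D
    · rw [if_pos hc, ih, pvMerge_nil]
      have hstep : pvStepB D c (cs.foldr (pvStepB D) []) =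
          String.ofList [c] :: cs.foldr (pvStepB D) [] := by simp [pvStepB, hc]
      rw [hstep]
      by_cases hcur : cur = []
      · simp [pvFlushA, pvMerge, hcur]
      · simp [pvFlushA, pvMerge, hcur, hc]
    · rw [if_neg hc, ih, pvMerge_snoc hc]

-- ===== VERDICT (by name: the statement is the Claim_ definition above) =====
theorem split_with_delimiters_spec : Claim_equal_split_with_delimiters := by
  intro text delimiters _
  unfold Spec_split_with_delimiters split_with_delimiters split_with_delimiters_alt
  rw [pvLoopA_eq, pvMerge_nil, List.nil_append]
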